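-- pv_equiv track=rewrite | github.com/Schoyen/compound-indices | compound_indices/dense.py | inds_to_comp_as
-- ===== SOURCE A (Python) =====
-- import math
--
-- def inds_to_comp_as(indices, L):
--     N = len(indices)
--     assert len(L) == N
--
--     comp = 0
--
--     for i in range(N):
--         val = indices[i] * math.prod(L[i + 1 :])
--         comp += val
--
--     return comp
-- ===== SOURCE B (Python) =====
-- def inds_to_comp_as(indices, L):
--     assert len(L) == len(indices)
--     comp = 0
--     for idx, radix in zip(indices, L):
--         comp = comp * radix + idx
--     return comp
-- ===== Notes on version B (the rewrite author's own statement) =====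
-- stated objective: faster
-- what changed: Replaced the per-index suffix product (math.prod of a fresh slice inside the loop) with a single Horner-style pass over zip(indices, L) that keeps one running accumulator.
import Mathlib
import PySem

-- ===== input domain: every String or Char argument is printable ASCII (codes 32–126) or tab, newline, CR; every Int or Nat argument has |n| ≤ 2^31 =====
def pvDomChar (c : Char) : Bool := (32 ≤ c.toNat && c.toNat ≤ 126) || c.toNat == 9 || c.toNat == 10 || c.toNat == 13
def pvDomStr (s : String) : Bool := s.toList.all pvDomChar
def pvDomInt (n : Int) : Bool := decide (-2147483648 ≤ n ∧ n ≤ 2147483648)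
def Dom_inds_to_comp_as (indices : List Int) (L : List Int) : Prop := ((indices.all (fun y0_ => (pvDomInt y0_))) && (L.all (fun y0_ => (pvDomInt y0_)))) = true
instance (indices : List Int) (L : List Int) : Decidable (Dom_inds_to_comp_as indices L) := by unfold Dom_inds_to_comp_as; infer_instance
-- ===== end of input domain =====

-- B replaces A's per-index suffix product (a fresh slice and math.prod inside the loop,
-- O(n^2)) by a single Horner-style pass over zip(indices, L) (O(n)); same return value.

-- ===== PORT A =====
-- for i in range(N): comp += indices[i] * math.prod(L[i+1:])
def inds_to_comp_as (indices : List Int) (L : List Int) : Int :=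
  (PySem.List.pyRange 0 indices.length 1).foldl
    (fun comp i =>
      comp + PySem.List.pyGetD indices i 0 * (PySem.List.slice L (some (i + 1)) none).prod) 0

-- ===== PORT B =====
-- for idx, radix in zip(indices, L): comp = comp * radix + idx
def inds_to_comp_as_alt (indices : List Int) (L : List Int) : Int :=
  (indices.zip L).foldl (fun comp p => comp * p.2 + p.1) 0

-- ===== PRECONDITION & SPEC =====
-- A asserts len(L) == len(indices) and raises AssertionError otherwise; Pre_ excludes exactly that.
def Pre_inds_to_comp_as (indices : List Int) (L : List Int) : Prop := indices.length = L.length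
instance (indices : List Int) (L : List Int) : Decidable (Pre_inds_to_comp_as indices L) := by unfold Pre_inds_to_comp_as; infer_instance
def pvWitness_inds_to_comp_as : List Int × List Int := ([1, 0, 2], [3, 4, 5])
def Spec_inds_to_comp_as (indices : List Int) (L : List Int) (out : Int) : Prop := out = inds_to_comp_as_alt indices L
instance (indices : List Int) (L : List Int) (out : Int) : Decidable (Spec_inds_to_comp_as indices L out) := by unfold Spec_inds_to_comp_as; infer_instance

-- ===== CLAIM (what is proved, stated in full; the proofs are below) =====
def Claim_equal_inds_to_comp_as : Prop := ∀ (indices : List Int) (L : List Int), Dom_inds_to_comp_as indices L → Pre_inds_to_comp_as indices L → Spec_inds_to_comp_as indices L (inds_to_comp_as indices L)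

-- ===== LEMMAS AND PROOFS =====

-- Peeling one index off A's loop: the i = 0 term is x * ys.prod, the rest is A on the tails.
lemma inds_to_comp_as_cons (x y : Int) (xs ys : List Int) :
    inds_to_comp_as (x :: xs) (y :: ys) = x * ys.prod + inds_to_comp_as xs ys := by
  unfold inds_to_comp_as
  rw [PySem.List.foldl_add, PySem.List.foldl_add]
  simp only [List.length_cons, PySem.List.pyRange_one]
  simp only [Int.sub_zero, Int.toNat_natCast, List.range_succ_eq_map, List.map_cons,
    List.map_map, List.sum_cons]
  have hfun : ∀ k : Nat,
      PySem.List.pyGetD (x :: xs) (0 + ((k+1 : Nat) : Int)) 0 *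
        (PySem.List.slice (y :: ys) (some (0 + ((k+1 : Nat) : Int) + 1)) none).prod
      = PySem.List.pyGetD xs (0 + (k : Int)) 0 *
        (PySem.List.slice ys (some (0 + (k : Int) + 1)) none).prod := by
    intro k
    have e1 : (0 : Int) + ((k+1 : Nat) : Int) = ((k+1 : Nat) : Int) := by ring
    have e2 : (0 : Int) + (k : Int) = ((k : Nat) : Int) := by ring
    rw [e1, e2, PySem.List.pyGetD_natCast, PySem.List.pyGetD_natCast]
    have e3 : ((k+1 : Nat) : Int) + 1 = ((k+2 : Nat) : Int) := by push_cast; ring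
    have e4 : ((k : Nat) : Int) + 1 = ((k+1 : Nat) : Int) := by push_cast; ring
    rw [e3, e4, PySem.List.slice_from_natCast, PySem.List.slice_from_natCast]
    simp
  have hterm : PySem.List.pyGetD (x :: xs) (0 + ((0:Nat) : Int)) 0 *
      (PySem.List.slice (y :: ys) (some (0 + ((0:Nat) : Int) + 1)) none).prod = x * ys.prod := by
    simp [PySem.List.pyGetD_zero_cons, PySem.List.slice_from_one]
  rw [hterm]
  have hmap : (List.map
      ((fun i => PySem.List.pyGetD (x :: xs) i 0 * (PySem.List.slice (y :: ys) (some (i + 1))).prod) ∘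
        (fun k : Nat => (0:Int) + ↑k) ∘ Nat.succ)
      (List.range xs.length)) =
    (List.map ((fun i => PySem.List.pyGetD xs i 0 * (PySem.List.slice ys (some (i + 1))).prod) ∘
        fun k : Nat => (0:Int) + ↑k) (List.range xs.length)) := by
    refine List.map_congr_left (fun k _ => ?_)
    simpa using hfun k
  rw [hmap]; ring

-- Horner invariant: a nonzero accumulator c contributes c * ys.prod to B's fold.
lemma alt_foldl_lin (xs : List Int) : ∀ (ys : List Int), xs.length = ys.length → ∀ c : Int,
    (xs.zip ys).foldl (fun comp p => comp * p.2 + p.1) c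
      = c * ys.prod + (xs.zip ys).foldl (fun comp p => comp * p.2 + p.1) 0 := by
  induction xs with
  | nil =>
    intro ys h c
    have : ys = [] := List.length_eq_zero_iff.mp h.symm
    simp [this]
  | cons x xs ih =>
    intro ys h c
    cases ys with
    | nil => simp at h
    | cons y ys =>
      simp only [List.zip_cons_cons, List.foldl_cons, List.prod_cons]
      rw [ih ys (by simpa using h) (c * y + x), ih ys (by simpa using h) (0 * y + x)]
      ring

lemma inds_to_comp_as_eq_alt (xs : List Int) : ∀ ys : List Int, xs.length = ys.length →
    inds_to_comp_as xs ys = inds_to_comp_as_alt xs ys := by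
  induction xs with
  | nil => intro ys h; simp [inds_to_comp_as, inds_to_comp_as_alt]
  | cons x xs ih =>
    intro ys h
    cases ys with
    | nil => simp at h
    | cons y ys =>
      rw [inds_to_comp_as_cons, ih ys (by simpa using h)]
      show _ = (((x, y) :: xs.zip ys).foldl (fun comp p => comp * p.2 + p.1) 0)
      simp only [List.foldl_cons]
      rw [alt_foldl_lin xs ys (by simpa using h) (0 * y + x)]
      unfold inds_to_comp_as_alt
      ring

-- ===== VERDICT (by name: the statement is the Claim_ definition above) =====
theorem inds_to_comp_as_spec : Claim_equal_inds_to_comp_as := by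
  intro indices L _ hpre
  exact inds_to_comp_as_eq_alt indices L hpre
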